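-- pv_equiv track=rewrite | github.com/razzlestorm/code-challenges | matrixElementsSum_Easy/naive_solution.py | matrixElementSum
-- ===== SOURCE A (Python) =====
-- def matrixElementSum(matrix):
--     # What do we need to do?
--     # We can create a list of indices to check,
--     # Then when an index is checked, if its value is 0,
--     # that index is added to a blocked filter
--     '''
--     Example input:
--     [[1,0,3],
--      [0,2,1],
--      [1,2,0]]
--     '''
--     # indices = list(range(0, len(matrix[0])))  <- this still works for 1-col matrices
--     # then we check the indices are not blocked
--     # if there is a 0, we add that index to the blocked list.
--     rooms = []
--     indices = list(range(0, len(matrix[0])))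
--     blocked = []
--     for row in matrix:
--         for ii in indices:
--             if row[ii] == 0:
--                 blocked.append(ii)
--             elif ii not in blocked:
--                 rooms.append(row[ii])
--     return sum(rooms)
-- ===== SOURCE B (Python) =====
-- def matrixElementSum(matrix):
--     total = 0
--     for c in range(len(matrix[0])):
--         for row in matrix:
--             if row[c] == 0:
--                 break
--             total += row[c]
--     return total
-- ===== Notes on version B (the rewrite author's own statement) =====
-- stated objective: simpler
-- what changed: Replaced the row-major scan that maintains a 'blocked' column list (and a rooms list summed at the end) by a column-major pass that adds cells top-down, breaking at the first zero in each column, keeping only a running total.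
import Mathlib
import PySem

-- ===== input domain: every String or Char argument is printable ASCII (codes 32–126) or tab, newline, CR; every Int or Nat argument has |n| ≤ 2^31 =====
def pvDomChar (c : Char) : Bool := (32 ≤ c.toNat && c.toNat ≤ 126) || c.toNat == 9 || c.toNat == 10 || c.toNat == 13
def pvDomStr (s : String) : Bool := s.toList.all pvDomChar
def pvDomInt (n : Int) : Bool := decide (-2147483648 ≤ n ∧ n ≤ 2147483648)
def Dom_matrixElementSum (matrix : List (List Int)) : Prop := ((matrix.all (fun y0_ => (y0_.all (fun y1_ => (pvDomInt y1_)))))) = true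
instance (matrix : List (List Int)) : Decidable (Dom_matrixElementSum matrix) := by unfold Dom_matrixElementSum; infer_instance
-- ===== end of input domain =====

-- B replaces A's row-major scan with a maintained 'blocked' column list by a
-- column-major pass that stops at the first zero in each column (objective: simpler).

-- ===== PORT A =====
-- one iteration of A's inner loop body: check row[ii], update (rooms, blocked)
def pvStepA (row : List Int) (st : List Int × List Int) (ii : Int) : List Int × List Int :=
  if PySem.List.pyGetD row ii 0 = 0 then (st.1, st.2 ++ [ii])
  else if ii ∈ st.2 then st
  else (st.1 ++ [PySem.List.pyGetD row ii 0], st.2)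

def matrixElementSum (matrix : List (List Int)) : Int :=
  let indices := PySem.List.pyRange 0 ((matrix.headD []).length : Int) 1
  let st := matrix.foldl (fun st row => indices.foldl (pvStepA row) st) ([], [])
  st.1.sum

-- ===== PORT B =====
-- inner loop of B: walk the rows of one column, stop at the first zero
def pvColSum : List (List Int) → Int → Int
  | [], _ => 0
  | row :: rest, c =>
      if PySem.List.pyGetD row c 0 = 0 then 0
      else PySem.List.pyGetD row c 0 + pvColSum rest c

def matrixElementSum_alt (matrix : List (List Int)) : Int :=
  (PySem.List.pyRange 0 ((matrix.headD []).length : Int) 1).foldl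
    (fun total c => total + pvColSum matrix c) 0

-- ===== PRECONDITION & SPEC =====
-- Pre_ excludes exactly the inputs where the Python A raises IndexError:
-- the empty matrix (matrix[0]) and ragged matrices with a row shorter than row 0.
def Pre_matrixElementSum (matrix : List (List Int)) : Prop :=
  matrix ≠ [] ∧ ∀ row ∈ matrix, (matrix.headD []).length ≤ row.length
instance (matrix : List (List Int)) : Decidable (Pre_matrixElementSum matrix) := by
  unfold Pre_matrixElementSum; infer_instance

def pvWitness_matrixElementSum : List (List Int) := [[1, 0, 3], [0, 2, 1], [1, 2, 0]]

def Spec_matrixElementSum (matrix : List (List Int)) (out : Int) : Prop := out = matrixElementSum_alt matrix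
instance (matrix : List (List Int)) (out : Int) : Decidable (Spec_matrixElementSum matrix out) := by unfold Spec_matrixElementSum; infer_instance

-- ===== CLAIM (what is proved, stated in full; the proofs are below) =====
def Claim_equal_matrixElementSum : Prop := ∀ (matrix : List (List Int)), Dom_matrixElementSum matrix → Pre_matrixElementSum matrix → Spec_matrixElementSum matrix (matrixElementSum matrix)

-- ===== LEMMAS AND PROOFS =====

-- A's inner loop: membership in the final blocked list
theorem pv_blocked_mem (row : List Int) (L : List Int) :
    ∀ (st : List Int × List Int) (x : Int),
      x ∈ (L.foldl (pvStepA row) st).2 ↔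
        x ∈ st.2 ∨ (x ∈ L ∧ PySem.List.pyGetD row x 0 = 0) := by
  induction L with
  | nil => simp
  | cons ii L ih =>
      intro st x
      simp only [List.foldl_cons, ih]
      unfold pvStepA
      by_cases h0 : PySem.List.pyGetD row ii 0 = 0
      · by_cases hx : x = ii <;> simp [h0, hx]
      · by_cases hx : x = ii <;> by_cases hb : ii ∈ st.2 <;>
          simp [h0, hx, hb]

-- A's inner loop: the sum of rooms it accumulates over one row
theorem pv_row_sum (row : List Int) (L : List Int) (hnd : L.Nodup) :
    ∀ (st : List Int × List Int),
      ((L.foldl (pvStepA row) st).1).sum =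
        st.1.sum + (L.map (fun ii =>
          if PySem.List.pyGetD row ii 0 = 0 ∨ ii ∈ st.2 then 0
          else PySem.List.pyGetD row ii 0)).sum := by
  induction L with
  | nil => simp
  | cons ii L ih =>
      intro st
      have hni : ii ∉ L := (List.nodup_cons.mp hnd).1
      have hnd' : L.Nodup := (List.nodup_cons.mp hnd).2
      simp only [List.foldl_cons, List.map_cons, List.sum_cons]
      by_cases h0 : PySem.List.pyGetD row ii 0 = 0
      · have hstep : pvStepA row st ii = (st.1, st.2 ++ [ii]) := by simp [pvStepA, h0]
        rw [hstep, ih hnd', if_pos (Or.inl h0)]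
        have hmc : (L.map (fun j =>
            if PySem.List.pyGetD row j 0 = 0 ∨ j ∈ st.2 ++ [ii] then 0
            else PySem.List.pyGetD row j 0)) =
          (L.map (fun j =>
            if PySem.List.pyGetD row j 0 = 0 ∨ j ∈ st.2 then 0
            else PySem.List.pyGetD row j 0)) := by
          apply List.map_congr_left
          intro j hj
          have hne : j ≠ ii := fun h => hni (h ▸ hj)
          simp [List.mem_append, hne]
        rw [hmc]; ring
      · by_cases hb : ii ∈ st.2
        · have hstep : pvStepA row st ii = st := by simp [pvStepA, h0, hb]
          rw [hstep, ih hnd', if_pos (Or.inr hb)]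
          ring
        · have hstep : pvStepA row st ii =
              (st.1 ++ [PySem.List.pyGetD row ii 0], st.2) := by
            simp [pvStepA, h0, hb]
          rw [hstep, ih hnd',
            if_neg (by tauto : ¬ (PySem.List.pyGetD row ii 0 = 0 ∨ ii ∈ st.2))]
          simp only [List.sum_append, List.sum_cons, List.sum_nil]
          ring

-- A's outer loop equals the per-column sums of B
theorem pv_outer (rows : List (List Int)) (L : List Int) (hnd : L.Nodup) :
    ∀ (st : List Int × List Int),
      ((rows.foldl (fun st row => L.foldl (pvStepA row) st) st).1).sum =
        st.1.sum + (L.map (fun ii =>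
          if ii ∈ st.2 then 0 else pvColSum rows ii)).sum := by
  induction rows with
  | nil =>
      intro st
      have hz : (L.map (fun ii => if ii ∈ st.2 then (0:Int) else pvColSum [] ii)) =
          L.map (fun _ => (0:Int)) := by
        apply List.map_congr_left; intro j _; simp [pvColSum]
      simp [hz]
  | cons row rest ih =>
      intro st
      simp only [List.foldl_cons]
      rw [ih (L.foldl (pvStepA row) st)]
      rw [pv_row_sum row L hnd st]
      have hmem := pv_blocked_mem row L st
      have hrw : (L.map (fun ii =>
          if ii ∈ (L.foldl (pvStepA row) st).2 then 0 else pvColSum rest ii)) =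
        (L.map (fun ii =>
          if ii ∈ st.2 ∨ PySem.List.pyGetD row ii 0 = 0 then 0 else pvColSum rest ii)) := by
        apply List.map_congr_left
        intro j hj
        simp [hmem j, hj]
      rw [hrw, add_assoc, ← List.sum_map_add]
      have hfin : (L.map (fun i =>
          (if PySem.List.pyGetD row i 0 = 0 ∨ i ∈ st.2 then 0
            else PySem.List.pyGetD row i 0) +
          (if i ∈ st.2 ∨ PySem.List.pyGetD row i 0 = 0 then 0 else pvColSum rest i))) =
        (L.map (fun ii => if ii ∈ st.2 then 0 else pvColSum (row :: rest) ii)) := by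
        apply List.map_congr_left
        intro j _
        simp only [pvColSum]
        by_cases hb : j ∈ st.2 <;> by_cases h0 : PySem.List.pyGetD row j 0 = 0 <;>
          simp [hb, h0]
      rw [hfin]

theorem matrixElementSum_eq_alt (matrix : List (List Int)) :
    matrixElementSum matrix = matrixElementSum_alt matrix := by
  unfold matrixElementSum matrixElementSum_alt
  rw [PySem.List.foldl_add (g := fun c => pvColSum matrix c)]
  rw [pv_outer matrix _ (PySem.List.nodup_pyRange_one 0 _) ([], [])]
  simp

-- ===== VERDICT (by name: the statement is the Claim_ definition above) =====
theorem matrixElementSum_spec : Claim_equal_matrixElementSum := by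
  intro matrix _ _
  exact matrixElementSum_eq_alt matrix
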